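-- pv_equiv track=rewrite | github.com/pyscf/pyscf-forge | pyscf/rttddft/utils.py | IxJ_to_IandJ
-- ===== SOURCE A (Python) =====
-- def IxJ_to_IandJ(IxJ,Ndim):
--     le=len(Ndim);
--     ret=[ -1 for k in range(le) ]
--     cur=IxJ
--     for i in range(le):
--         J=le-i-1
--         ret[J]=cur%Ndim[J]
--         cur=(cur-ret[J])//Ndim[J]
--     return ret
-- ===== SOURCE B (Python) =====
-- def IxJ_to_IandJ(IxJ, Ndim):
--     # Stage 1: stride table, stride[j] = product of Ndim[j+1:].
--     strides = []
--     acc = 1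
--     for d in reversed(Ndim):
--         strides.append(acc)
--         acc *= d
--     strides.reverse()
--     # Stage 2: each digit independently, no carried quotient.
--     return [(IxJ // s) % d for s, d in zip(strides, Ndim)]
-- ===== Notes on version B (the rewrite author's own statement) =====
-- stated objective: alternative
-- what changed: Replaces A's single carry-propagating pass (running quotient cur updated at every step) with a stride table (stride[j] = product of the dimensions after j) followed by an independent per-digit formula ret[j] = (IxJ // stride[j]) % Ndim[j], so no quotient state flows between digits.
-- outside the precondition, e.g. on IxJ_to_IandJ(-51, [3, -1, 2]): A returns [2, 0, 1], B returns [1, 0, 1]; on IxJ_to_IandJ(1, [0, 2]): A raises ZeroDivisionError, B raises ZeroDivisionError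
import Mathlib
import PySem

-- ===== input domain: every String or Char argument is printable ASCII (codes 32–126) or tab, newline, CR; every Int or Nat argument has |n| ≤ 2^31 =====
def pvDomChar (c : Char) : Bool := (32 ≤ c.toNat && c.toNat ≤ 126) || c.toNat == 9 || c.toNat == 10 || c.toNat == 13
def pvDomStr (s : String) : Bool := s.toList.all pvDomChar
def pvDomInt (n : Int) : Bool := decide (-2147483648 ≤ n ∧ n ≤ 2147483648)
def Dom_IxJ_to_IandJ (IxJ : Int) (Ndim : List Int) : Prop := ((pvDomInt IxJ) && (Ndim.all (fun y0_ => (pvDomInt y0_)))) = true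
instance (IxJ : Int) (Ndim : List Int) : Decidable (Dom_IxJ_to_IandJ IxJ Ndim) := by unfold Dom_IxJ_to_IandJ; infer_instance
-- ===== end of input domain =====

-- B replaces A's carry-propagating single pass with a stride table (stride[j] = product of the
-- dimensions after j) followed by an independent per-digit formula (IxJ // stride[j]) % Ndim[j]
-- (objective: alternative algorithm, no quotient state flows between digits).

-- ===== PORT A =====
-- ret[J]=cur%Ndim[J]; cur=(cur-ret[J])//Ndim[J], looping i in range(le) with J=le-i-1,
-- over a preallocated list of -1; state = (ret, cur).
def IxJ_to_IandJ (IxJ : Int) (Ndim : List Int) : List Int :=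
  let le : Int := Ndim.length
  ((PySem.List.pyRange 0 le 1).foldl
    (fun (s : List Int × Int) i =>
      let J := le - i - 1
      let d := PySem.List.pyGetD Ndim J 0
      let r := PySem.Int.mod s.2 d
      (s.1.set J.toNat r, PySem.Int.floordiv (s.2 - r) d))
    (List.replicate Ndim.length (-1), IxJ)).1

-- ===== PORT B =====
-- for d in reversed(Ndim): strides.append(acc); acc *= d — then strides.reverse() and
-- [(IxJ // s) % d for s, d in zip(strides, Ndim)].
def IxJ_to_IandJ_alt (IxJ : Int) (Ndim : List Int) : List Int :=
  let p := Ndim.reverse.foldl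
    (fun (s : List Int × Int) d => (s.1 ++ [s.2], s.2 * d)) (([] : List Int), 1)
  let strides := p.1.reverse
  (strides.zip Ndim).map (fun sd => PySem.Int.mod (PySem.Int.floordiv IxJ sd.1) sd.2)

-- ===== PRECONDITION & SPEC =====
-- Pre_ restricts to positive dimensions, the natural domain of a shape list: a zero dimension
-- makes Python A raise ZeroDivisionError, and a negative dimension is not a valid extent — there
-- the mixed-radix unraveling is unspecified and A's carried floor-division digits are accidental
-- (B's independent stride digits are an equally defensible reading).
def Pre_IxJ_to_IandJ (IxJ : Int) (Ndim : List Int) : Prop := Ndim.all (fun d => decide (0 < d)) = true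
instance (IxJ : Int) (Ndim : List Int) : Decidable (Pre_IxJ_to_IandJ IxJ Ndim) := by unfold Pre_IxJ_to_IandJ; infer_instance
def pvWitness_IxJ_to_IandJ : Int × List Int := (7, [2, 3, 4])

def Spec_IxJ_to_IandJ (IxJ : Int) (Ndim : List Int) (out : List Int) : Prop := out = IxJ_to_IandJ_alt IxJ Ndim
instance (IxJ : Int) (Ndim : List Int) (out : List Int) : Decidable (Spec_IxJ_to_IandJ IxJ Ndim out) := by unfold Spec_IxJ_to_IandJ; infer_instance

-- ===== CLAIM (what is proved, stated in full; the proofs are below) =====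
def Claim_equal_IxJ_to_IandJ : Prop := ∀ (IxJ : Int) (Ndim : List Int), Dom_IxJ_to_IandJ IxJ Ndim → Pre_IxJ_to_IandJ IxJ Ndim → Spec_IxJ_to_IandJ IxJ Ndim (IxJ_to_IandJ IxJ Ndim)

-- ===== LEMMAS AND PROOFS =====

-- Reference: the digits of cur in the (reversed) radix list l, in processing order.
def pvDigitsRev (cur : Int) : List Int → List Int
  | [] => []
  | d :: rest => PySem.Int.mod cur d :: pvDigitsRev (PySem.Int.floordiv cur d) rest

-- Running quotient over the reversed radix list.
def pvQ (cur : Int) (l : List Int) : Int := l.foldl PySem.Int.floordiv cur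

lemma pvQ_cons (cur d : Int) (l : List Int) :
    pvQ cur (d :: l) = pvQ (PySem.Int.floordiv cur d) l := rfl

lemma digitsRev_append_last (d : Int) : ∀ (l : List Int) (cur : Int),
    pvDigitsRev cur (l ++ [d]) = pvDigitsRev cur l ++ [PySem.Int.mod (pvQ cur l) d] := by
  intro l
  induction l with
  | nil => intro cur; simp [pvDigitsRev, pvQ]
  | cons x rest ih =>
      intro cur
      simp only [List.cons_append, pvDigitsRev, pvQ_cons, ih]

-- ---- A-side characterisation ----

-- The A-loop body, abstracted over the dimension list it reads and its length.
def pvStepA (Ndim : List Int) (le : Int) : List Int × Int → Int → List Int × Int :=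
  fun s i =>
    let J := le - i - 1
    let d := PySem.List.pyGetD Ndim J 0
    let r := PySem.Int.mod s.2 d
    (s.1.set J.toNat r, PySem.Int.floordiv (s.2 - r) d)

lemma a_def (IxJ : Int) (Ndim : List Int) :
    IxJ_to_IandJ IxJ Ndim =
      ((PySem.List.pyRange 0 Ndim.length 1).foldl (pvStepA Ndim Ndim.length)
        (List.replicate Ndim.length (-1), IxJ)).1 := rfl

-- Shift lemma: with an extra head dimension and one more slot, iterations i with i < n act
-- on the tail of the slot list exactly as the fold for the tail dimension list does.
lemma fold_shift (dHd : Int) (ds : List Int) :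
    ∀ (is : List Int), (∀ i ∈ is, 0 ≤ i ∧ i < (ds.length : Int)) →
    ∀ (r0 : Int) (ret : List Int) (cur : Int),
    is.foldl (pvStepA (dHd :: ds) (ds.length + 1)) (r0 :: ret, cur)
      = ((r0 :: (is.foldl (pvStepA ds ds.length) (ret, cur)).1),
         (is.foldl (pvStepA ds ds.length) (ret, cur)).2) := by
  intro is
  induction is with
  | nil => intro _ r0 ret cur; simp
  | cons i rest ih =>
      intro hmem r0 ret cur
      obtain ⟨hi0, hin⟩ := hmem i (by simp)
      have hrest : ∀ j ∈ rest, 0 ≤ j ∧ j < (ds.length : Int) := fun j hj => hmem j (by simp [hj])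
      have e1 : (ds.length : Int) + 1 - i - 1 = ((((ds.length : Int) - i - 1).toNat + 1 : Nat) : Int) := by omega
      have e2 : (ds.length : Int) - i - 1 = ((((ds.length : Int) - i - 1).toNat : Nat) : Int) := by omega
      have hget : PySem.List.pyGetD (dHd :: ds) ((ds.length : Int) + 1 - i - 1) 0
          = PySem.List.pyGetD ds ((ds.length : Int) - i - 1) 0 := by
        rw [e1, e2, PySem.List.pyGetD_natCast, PySem.List.pyGetD_natCast]
        simp
      have hsetn : (((ds.length : Int) + 1 - i - 1)).toNat = (((ds.length : Int) - i - 1)).toNat + 1 := by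
        omega
      have hstep : pvStepA (dHd :: ds) ((ds.length : Int) + 1) (r0 :: ret, cur) i
          = (r0 :: (pvStepA ds (ds.length : Int) (ret, cur) i).1,
             (pvStepA ds (ds.length : Int) (ret, cur) i).2) := by
        unfold pvStepA
        simp only [hget, hsetn, List.set_cons_succ]
      simp only [List.foldl_cons, hstep]
      rw [ih hrest]

-- Cons law for the A fold (both components), via range-split at the last iteration.
lemma a_fold_cons (d : Int) (ds : List Int) (cur : Int) :
    (PySem.List.pyRange 0 ((ds.length : Int) + 1) 1).foldl (pvStepA (d :: ds) (ds.length + 1))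
        (List.replicate (ds.length + 1) (-1), cur)
      = (let p := (PySem.List.pyRange 0 (ds.length : Int) 1).foldl (pvStepA ds ds.length)
            (List.replicate ds.length (-1), cur)
         let r := PySem.Int.mod p.2 d
         (r :: p.1, PySem.Int.floordiv (p.2 - r) d)) := by
  rw [PySem.List.pyRange_one_succ_right (by positivity)]
  rw [List.foldl_append]
  have hmem : ∀ i ∈ PySem.List.pyRange 0 (ds.length : Int) 1, 0 ≤ i ∧ i < (ds.length : Int) := by
    intro i hi
    exact (PySem.List.mem_pyRange_one.mp hi)
  have hrep : (List.replicate (ds.length + 1) (-1) : List Int)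
      = (-1) :: List.replicate ds.length (-1) := rfl
  rw [hrep, fold_shift d ds _ hmem]
  simp only [List.foldl_cons, List.foldl_nil]
  have hJ : (ds.length : Int) + 1 - (ds.length : Int) - 1 = 0 := by ring
  unfold pvStepA
  simp only [hJ, PySem.List.pyGetD_zero_cons, Int.toNat_zero, List.set_cons_zero]

-- Under nonzero dims, A's exact-quotient update equals Python floor division.
lemma exact_quot (cur d : Int) (hd : d ≠ 0) :
    PySem.Int.floordiv (cur - PySem.Int.mod cur d) d = PySem.Int.floordiv cur d := by
  have h := PySem.Int.floordiv_mul_add_mod cur d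
  have : cur - PySem.Int.mod cur d = PySem.Int.floordiv cur d * d := by omega
  rw [this]
  show Int.fdiv _ _ = _
  rw [Int.mul_fdiv_cancel _ hd]

-- The A fold's quotient is the plain floordiv fold over the reversed dims.
lemma a_fold_snd (ds : List Int) : (∀ d ∈ ds, d ≠ 0) → ∀ (cur : Int),
    ((PySem.List.pyRange 0 (ds.length : Int) 1).foldl (pvStepA ds ds.length)
      (List.replicate ds.length (-1), cur)).2 = pvQ cur ds.reverse := by
  induction ds with
  | nil => intro _ cur; simp [pvQ]
  | cons d rest ih =>
      intro hnz cur
      simp only [List.length_cons, Nat.cast_add, Nat.cast_one]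
      rw [a_fold_cons d rest cur]
      simp only []
      rw [exact_quot _ _ (hnz d (by simp))]
      rw [ih (fun x hx => hnz x (by simp [hx]))]
      rw [List.reverse_cons]
      simp [pvQ]

-- A's result list equals the reversed digit list.
lemma a_eq (Ndim : List Int) : (∀ d ∈ Ndim, d ≠ 0) → ∀ (cur : Int),
    IxJ_to_IandJ cur Ndim = (pvDigitsRev cur Ndim.reverse).reverse := by
  induction Ndim with
  | nil => intro _ cur; simp [IxJ_to_IandJ, pvDigitsRev]
  | cons d rest ih =>
      intro hnz cur
      rw [a_def]
      simp only [List.length_cons, Nat.cast_add, Nat.cast_one]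
      rw [a_fold_cons d rest cur]
      simp only []
      rw [List.reverse_cons, digitsRev_append_last d rest.reverse cur, List.reverse_append]
      simp only [List.reverse_cons, List.reverse_nil, List.nil_append, List.singleton_append]
      congr 1
      · rw [a_fold_snd rest (fun x hx => hnz x (by simp [hx])) cur]
      · have := ih (fun x hx => hnz x (by simp [hx])) cur
        rw [a_def] at this
        exact this

-- ---- B-side characterisation ----

-- Running accumulator values appended by B's stride loop.
def pvAccs (a : Int) : List Int → List Int
  | [] => []
  | d :: l => a :: pvAccs (a * d) l

lemma b_stride_fold (l : List Int) : ∀ (acc : List Int) (a : Int),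
    l.foldl (fun (s : List Int × Int) d => (s.1 ++ [s.2], s.2 * d)) (acc, a)
      = (acc ++ pvAccs a l, a * l.prod) := by
  induction l with
  | nil => intro acc a; simp [pvAccs]
  | cons d rest ih =>
      intro acc a
      simp only [List.foldl_cons, ih, pvAccs, List.prod_cons]
      simp [mul_assoc]

lemma pvAccs_append_last (d : Int) : ∀ (l : List Int) (a : Int),
    pvAccs a (l ++ [d]) = pvAccs a l ++ [a * l.prod] := by
  intro l
  induction l with
  | nil => intro a; simp [pvAccs]
  | cons x rest ih => intro a; simp [pvAccs, ih, mul_assoc]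

-- The carried quotient chain collapses to one floor division by the product (positive dims).
lemma pvQ_eq_floordiv_prod (l : List Int) : (∀ d ∈ l, 0 < d) → ∀ (x : Int),
    pvQ x l = PySem.Int.floordiv x l.prod := by
  induction l with
  | nil =>
      intro _ x
      show x = PySem.Int.floordiv x 1
      simp [PySem.Int.floordiv]
  | cons d rest ih =>
      intro hpos x
      have hd : 0 < d := hpos d (by simp)
      have hp : 0 < rest.prod := List.prod_pos (fun y hy => hpos y (by simp [hy]))
      rw [pvQ_cons, ih (fun y hy => hpos y (by simp [hy]))]
      rw [PySem.Int.floordiv_eq_ediv_of_pos hd, PySem.Int.floordiv_eq_ediv_of_pos hp,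
          PySem.Int.floordiv_eq_ediv_of_pos (by simp [List.prod_cons]; positivity)]
      rw [List.prod_cons]
      exact Int.ediv_ediv_of_nonneg (le_of_lt hd)

-- B's result list equals the reversed digit list (positive dims).
lemma b_eq (Ndim : List Int) : (∀ d ∈ Ndim, 0 < d) → ∀ (x : Int),
    IxJ_to_IandJ_alt x Ndim = (pvDigitsRev x Ndim.reverse).reverse := by
  induction Ndim with
  | nil => intro _ x; simp [IxJ_to_IandJ_alt, pvDigitsRev]
  | cons d rest ih =>
      intro hpos x
      have hrest : ∀ y ∈ rest, 0 < y := fun y hy => hpos y (by simp [hy])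
      unfold IxJ_to_IandJ_alt
      simp only [List.reverse_cons, b_stride_fold, List.nil_append,
        pvAccs_append_last, one_mul, List.reverse_append, List.reverse_cons,
        List.reverse_nil, List.nil_append, List.singleton_append, List.zip_cons_cons,
        List.map_cons]
      rw [digitsRev_append_last d rest.reverse x, List.reverse_append]
      simp only [List.reverse_cons, List.reverse_nil, List.nil_append, List.singleton_append]
      congr 1
      · rw [pvQ_eq_floordiv_prod rest.reverse (by simpa using hrest) x,
            List.prod_reverse]
      · have := ih hrest x
        unfold IxJ_to_IandJ_alt at this
        simp only [b_stride_fold, List.nil_append] at this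
        exact this

-- ===== VERDICT (by name: the statement is the Claim_ definition above) =====
theorem IxJ_to_IandJ_spec : Claim_equal_IxJ_to_IandJ := by
  intro IxJ Ndim _ hpre
  unfold Pre_IxJ_to_IandJ at hpre
  simp only [List.all_eq_true, decide_eq_true_eq] at hpre
  unfold Spec_IxJ_to_IandJ
  rw [a_eq Ndim (fun d hd => ne_of_gt (hpre d hd)) IxJ, b_eq Ndim hpre IxJ]
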